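-- pv_equiv track=rewrite | github.com/zespy5/my-backjun | 14502.py | make_permu
-- ===== SOURCE A (Python) =====
-- from itertools import combinations
--
-- def make_permu(rows, cols, grid):
--     zero_positions = []
--     virus_positions = []
--     wall_positions = []
--
--     for i in range(rows):
--         for j in range(cols):
--             if grid[i][j] == 0:
--                 zero_positions.append((i,j))
--             elif grid[i][j] == 1:
--                 wall_positions.append((i,j))
--             else:
--                 virus_positions.append((i,j))
--
--     permutations = combinations(zero_positions,3)
--
--     new_grids = []
--
--     def make_g(new_g, pos, value):
--         for i, j in pos:
--             new_g[i][j] = value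
--
--     for a,b,c in permutations:
--         new_g = [[0]*cols for _ in range(rows)]
--         make_g(new_g, wall_positions, 1)
--         make_g(new_g, (a,b,c), 1)
--         make_g(new_g, virus_positions,2)
--         new_grids.append(new_g)
--
--
--     return new_grids, virus_positions
-- ===== SOURCE B (Python) =====
-- from itertools import combinations
--
-- def make_permu(rows, cols, grid):
--     cells = [(i, j) for i in range(rows) for j in range(cols)]
--     zeros = [(i, j) for (i, j) in cells if grid[i][j] == 0]
--     walls = [(i, j) for (i, j) in cells if grid[i][j] == 1]
--     viruses = [(i, j) for (i, j) in cells if grid[i][j] != 0 and grid[i][j] != 1]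
--     new_grids = [
--         [[2 if (i, j) in viruses else 1 if (i, j) in walls or (i, j) in combo else 0
--           for j in range(cols)]
--          for i in range(rows)]
--         for combo in combinations(zeros, 3)]
--     return new_grids, viruses
-- ===== Notes on version B (the rewrite author's own statement) =====
-- stated objective: simpler
-- what changed: B classifies cells by filtering one flattened coordinate list and builds each candidate grid directly with a per-cell double comprehension over membership tests, instead of allocating a zero grid and mutating it position-list by position-list for every combination.
import Mathlib
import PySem

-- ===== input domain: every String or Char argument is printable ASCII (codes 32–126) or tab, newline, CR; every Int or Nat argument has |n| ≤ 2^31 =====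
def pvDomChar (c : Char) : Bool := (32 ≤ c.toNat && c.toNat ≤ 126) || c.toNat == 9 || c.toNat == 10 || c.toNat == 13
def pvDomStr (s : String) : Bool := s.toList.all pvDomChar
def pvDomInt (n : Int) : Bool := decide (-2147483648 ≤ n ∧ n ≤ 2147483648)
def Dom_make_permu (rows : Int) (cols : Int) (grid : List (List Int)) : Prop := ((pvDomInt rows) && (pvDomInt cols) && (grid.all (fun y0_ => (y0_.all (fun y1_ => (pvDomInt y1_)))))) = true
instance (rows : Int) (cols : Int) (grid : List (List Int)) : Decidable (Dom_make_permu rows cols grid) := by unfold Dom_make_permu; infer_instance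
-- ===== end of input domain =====

-- B rewrites A with per-cell double comprehensions over membership tests instead of
-- allocating and mutating a grid per combination (objective: simpler; same asymptotic cost).

-- grid[i][j]: exact under Pre_ (both indices are nonnegative and in range there)
def pvCell (grid : List (List Int)) (i j : Int) : Int :=
  PySem.List.pyGetD (PySem.List.pyGetD grid i []) j 0

-- itertools.combinations(xs, 2) / (xs, 3), in itertools order (shared library helper)
def pvCombos2 {α : Type} (xs : List α) : List (α × α) :=
  match xs with
  | [] => []
  | x :: rest => (rest.map (fun b => (x, b))) ++ pvCombos2 rest

def pvCombos3 {α : Type} (xs : List α) : List (α × α × α) :=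
  match xs with
  | [] => []
  | x :: rest => ((pvCombos2 rest).map (fun bc => (x, bc.1, bc.2))) ++ pvCombos3 rest

-- ===== PORT A =====
-- new_g[i][j] = value; the positions written always come from range(rows)×range(cols),
-- hence are nonnegative and in range, so natAbs/set is exact here
def pvMakeG (g : List (List Int)) (pos : List (Int × Int)) (v : Int) : List (List Int) :=
  pos.foldl (fun g p => g.set p.1.natAbs ((g.getD p.1.natAbs []).set p.2.natAbs v)) g

def make_permu (rows : Int) (cols : Int) (grid : List (List Int)) : List (List (List Int)) × (List (Int × Int)) :=
  let scan := (PySem.List.pyRange 0 rows 1).foldl (fun acc i =>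
      (PySem.List.pyRange 0 cols 1).foldl
        (fun (acc : List (Int × Int) × List (Int × Int) × List (Int × Int)) j =>
          if pvCell grid i j == 0 then (acc.1 ++ [(i, j)], acc.2.1, acc.2.2)
          else if pvCell grid i j == 1 then (acc.1, acc.2.1 ++ [(i, j)], acc.2.2)
          else (acc.1, acc.2.1, acc.2.2 ++ [(i, j)])) acc)
      (([], [], []) : List (Int × Int) × List (Int × Int) × List (Int × Int))
  let zero_positions := scan.1
  let wall_positions := scan.2.1
  let virus_positions := scan.2.2
  let new_grids := (pvCombos3 zero_positions).foldl (fun ng abc =>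
      let g0 := (PySem.List.pyRange 0 rows 1).map (fun _ => List.replicate cols.toNat (0 : Int))
      let g1 := pvMakeG g0 wall_positions 1
      let g2 := pvMakeG g1 [abc.1, abc.2.1, abc.2.2] 1
      let g3 := pvMakeG g2 virus_positions 2
      ng ++ [g3]) []
  (new_grids, virus_positions)

-- ===== PORT B =====
def pvCells (rows cols : Int) : List (Int × Int) :=
  (PySem.List.pyRange 0 rows 1).flatMap (fun i => (PySem.List.pyRange 0 cols 1).map (fun j => (i, j)))

def make_permu_alt (rows : Int) (cols : Int) (grid : List (List Int)) : List (List (List Int)) × (List (Int × Int)) :=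
  let cells := pvCells rows cols
  let zeros := cells.filter (fun p => pvCell grid p.1 p.2 == 0)
  let walls := cells.filter (fun p => pvCell grid p.1 p.2 == 1)
  let viruses := cells.filter (fun p => pvCell grid p.1 p.2 != 0 && pvCell grid p.1 p.2 != 1)
  let new_grids := (pvCombos3 zeros).map (fun combo =>
      (PySem.List.pyRange 0 rows 1).map (fun i =>
        (PySem.List.pyRange 0 cols 1).map (fun j =>
          if viruses.contains (i, j) then (2 : Int)
          else if walls.contains (i, j) || (i, j) == combo.1 || (i, j) == combo.2.1 || (i, j) == combo.2.2 then 1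
          else 0)))
  (new_grids, viruses)

-- ===== PRECONDITION & SPEC =====
-- Pre_ excludes exactly the inputs where Python A raises IndexError: some scanned cell
-- grid[i][j] (0 ≤ i < rows, 0 ≤ j < cols) is out of range.
def Pre_make_permu (rows : Int) (cols : Int) (grid : List (List Int)) : Prop :=
  cols ≤ 0 ∨ (rows ≤ (grid.length : Int) ∧ ∀ row ∈ grid.take rows.toNat, cols ≤ (row.length : Int))
instance (rows : Int) (cols : Int) (grid : List (List Int)) : Decidable (Pre_make_permu rows cols grid) := by unfold Pre_make_permu; infer_instance

def pvWitness_make_permu : Int × Int × List (List Int) := (2, 2, [[0, 0], [2, 0]])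

def Spec_make_permu (rows : Int) (cols : Int) (grid : List (List Int)) (out : List (List (List Int)) × (List (Int × Int))) : Prop := out = make_permu_alt rows cols grid
instance (rows : Int) (cols : Int) (grid : List (List Int)) (out : List (List (List Int)) × (List (Int × Int))) : Decidable (Spec_make_permu rows cols grid out) := by unfold Spec_make_permu; infer_instance

-- ===== CLAIM (what is proved, stated in full; the proofs are below) =====
def Claim_equal_make_permu : Prop := ∀ (rows : Int) (cols : Int) (grid : List (List Int)), Dom_make_permu rows cols grid → Pre_make_permu rows cols grid → Spec_make_permu rows cols grid (make_permu rows cols grid)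


-- ===== LEMMAS AND PROOFS =====

theorem pvFoldl_flatMap {α β γ : Type} (g : α → List β) (f : γ → β → γ) (l : List α) (init : γ) :
    (l.flatMap g).foldl f init = l.foldl (fun acc x => (g x).foldl f acc) init := by
  induction l generalizing init with
  | nil => rfl
  | cons x xs ih => simp [List.flatMap_cons, List.foldl_append, ih]

theorem pvFoldl_triple (c : Int × Int → Int) (xs : List (Int × Int))
    (z w v : List (Int × Int)) :
    xs.foldl (fun acc p =>
        if c p == 0 then (acc.1 ++ [p], acc.2.1, acc.2.2)
        else if c p == 1 then (acc.1, acc.2.1 ++ [p], acc.2.2)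
        else (acc.1, acc.2.1, acc.2.2 ++ [p])) (z, w, v)
    = (z ++ xs.filter (fun p => c p == 0),
       w ++ xs.filter (fun p => c p == 1),
       v ++ xs.filter (fun p => c p != 0 && c p != 1)) := by
  induction xs generalizing z w v with
  | nil => simp
  | cons p xs ih =>
    rw [List.foldl_cons]
    by_cases h0 : c p = 0
    · rw [if_pos (by simp [h0]), ih]
      simp [h0]
    · by_cases h1 : c p = 1
      · rw [if_neg (by simp [h0]), if_pos (by simp [h1]), ih]
        simp [List.filter_cons, h1]
      · rw [if_neg (by simp [h0]), if_neg (by simp [h1]), ih]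
        simp [h0, h1]

theorem make_permu_scan_eq (rows cols : Int) (grid : List (List Int)) :
    (PySem.List.pyRange 0 rows 1).foldl (fun acc i =>
      (PySem.List.pyRange 0 cols 1).foldl
        (fun (acc : List (Int × Int) × List (Int × Int) × List (Int × Int)) j =>
          if pvCell grid i j == 0 then (acc.1 ++ [(i, j)], acc.2.1, acc.2.2)
          else if pvCell grid i j == 1 then (acc.1, acc.2.1 ++ [(i, j)], acc.2.2)
          else (acc.1, acc.2.1, acc.2.2 ++ [(i, j)])) acc)
      (([], [], []) : List (Int × Int) × List (Int × Int) × List (Int × Int))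
    = ((pvCells rows cols).filter (fun p => pvCell grid p.1 p.2 == 0),
       (pvCells rows cols).filter (fun p => pvCell grid p.1 p.2 == 1),
       (pvCells rows cols).filter (fun p => pvCell grid p.1 p.2 != 0 && pvCell grid p.1 p.2 != 1)) := by
  have e1 : (PySem.List.pyRange 0 rows 1).foldl (fun acc i =>
      (PySem.List.pyRange 0 cols 1).foldl
        (fun (acc : List (Int × Int) × List (Int × Int) × List (Int × Int)) j =>
          if pvCell grid i j == 0 then (acc.1 ++ [(i, j)], acc.2.1, acc.2.2)
          else if pvCell grid i j == 1 then (acc.1, acc.2.1 ++ [(i, j)], acc.2.2)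
          else (acc.1, acc.2.1, acc.2.2 ++ [(i, j)])) acc)
      (([], [], []) : List (Int × Int) × List (Int × Int) × List (Int × Int))
      = (pvCells rows cols).foldl
        (fun (acc : List (Int × Int) × List (Int × Int) × List (Int × Int)) p =>
          if pvCell grid p.1 p.2 == 0 then (acc.1 ++ [p], acc.2.1, acc.2.2)
          else if pvCell grid p.1 p.2 == 1 then (acc.1, acc.2.1 ++ [p], acc.2.2)
          else (acc.1, acc.2.1, acc.2.2 ++ [p]))
        (([], [], []) : List (Int × Int) × List (Int × Int) × List (Int × Int)) := by
    unfold pvCells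
    rw [pvFoldl_flatMap]
    simp only [List.foldl_map]
  rw [e1, pvFoldl_triple (fun p => pvCell grid p.1 p.2)]
  simp

theorem pvMem_combos2 {α : Type} {x : α × α} {xs : List α} (h : x ∈ pvCombos2 xs) :
    x.1 ∈ xs ∧ x.2 ∈ xs := by
  induction xs with
  | nil => simp [pvCombos2] at h
  | cons a rest ih =>
    rw [pvCombos2] at h
    rcases List.mem_append.mp h with h' | h'
    · obtain ⟨b, hb, hx⟩ := List.mem_map.mp h'
      subst hx; exact ⟨List.mem_cons_self, List.mem_cons_of_mem _ hb⟩
    · exact ⟨List.mem_cons_of_mem _ (ih h').1, List.mem_cons_of_mem _ (ih h').2⟩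

theorem pvMem_combos3 {α : Type} {x : α × α × α} {xs : List α} (h : x ∈ pvCombos3 xs) :
    x.1 ∈ xs ∧ x.2.1 ∈ xs ∧ x.2.2 ∈ xs := by
  induction xs with
  | nil => simp [pvCombos3] at h
  | cons a rest ih =>
    rw [pvCombos3] at h
    rcases List.mem_append.mp h with h' | h'
    · obtain ⟨bc, hbc, hx⟩ := List.mem_map.mp h'
      subst hx
      exact ⟨List.mem_cons_self, List.mem_cons_of_mem _ (pvMem_combos2 hbc).1,
        List.mem_cons_of_mem _ (pvMem_combos2 hbc).2⟩
    · exact ⟨List.mem_cons_of_mem _ (ih h').1, List.mem_cons_of_mem _ (ih h').2.1,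
        List.mem_cons_of_mem _ (ih h').2.2⟩

theorem pvMem_cells {rows cols : Int} {p : Int × Int} :
    p ∈ pvCells rows cols ↔ 0 ≤ p.1 ∧ p.1 < rows ∧ 0 ≤ p.2 ∧ p.2 < cols := by
  obtain ⟨i, j⟩ := p
  simp [pvCells, List.mem_flatMap, PySem.List.mem_pyRange_one]
  tauto

def pvEntry (g : List (List Int)) (i j : Nat) : Int := (g.getD i []).getD j 0

def pvShape (R C : Nat) (g : List (List Int)) : Prop :=
  g.length = R ∧ ∀ r ∈ g, r.length = C

theorem pvGetD_eq (g : List (List Int)) (i : Nat) : g.getD i [] = (g[i]?).getD [] := by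
  simp [List.getD]

theorem pvMakeG_shape_entry (R C : Nat) (v : Int) (pos : List (Int × Int))
    (hpos : ∀ p ∈ pos, 0 ≤ p.1 ∧ p.1 < (R : Int) ∧ 0 ≤ p.2 ∧ p.2 < (C : Int)) :
    ∀ g, pvShape R C g → pvShape R C (pvMakeG g pos v) ∧
      ∀ i j, i < R → j < C →
        pvEntry (pvMakeG g pos v) i j =
          if ((i : Int), (j : Int)) ∈ pos then v else pvEntry g i j := by
  induction pos with
  | nil => intro g hg; simpa [pvMakeG] using hg
  | cons p rest ih =>
    intro g hg
    obtain ⟨hp, hrest⟩ := List.forall_mem_cons.mp hpos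
    obtain ⟨hp1, hp2, hp3, hp4⟩ := hp
    have hgl : g.length = R := hg.1
    set row := g.getD p.1.natAbs []
    have hrowmem : row ∈ g := by
      show g.getD p.1.natAbs [] ∈ g
      rw [pvGetD_eq, List.getElem?_eq_getElem (by omega : p.1.natAbs < g.length)]
      exact List.getElem_mem _
    have hrowlen : row.length = C := hg.2 row hrowmem
    set g' := g.set p.1.natAbs (row.set p.2.natAbs v) with hg'def
    have hshape' : pvShape R C g' := by
      constructor
      · simp [hg'def, hg.1]
      · intro r hr
        rcases List.mem_or_eq_of_mem_set hr with h' | h'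
        · exact hg.2 r h'
        · rw [h', List.length_set, hrowlen]
    have hstep : pvMakeG g (p :: rest) v = pvMakeG g' rest v := rfl
    have hmain := ih hrest g' hshape'
    refine ⟨by rw [hstep]; exact hmain.1, ?_⟩
    intro i j hi hj
    rw [hstep, hmain.2 i j hi hj]
    by_cases hr : ((i : Int), (j : Int)) ∈ rest
    · simp [hr]
    · have hgi : i < g.length := by omega
      have hentry' : pvEntry g' i j =
          if p = ((i : Int), (j : Int)) then v else pvEntry g i j := by
        unfold pvEntry
        rw [pvGetD_eq, pvGetD_eq g, hg'def, List.getElem?_set]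
        by_cases hieq : p.1.natAbs = i
        · simp only [hieq, hgi, if_pos]
          have hrow' : (g[i]?).getD [] = row := by
            rw [← hieq, ← pvGetD_eq]
          rw [List.getD, List.getD, Option.getD_some]
          rw [← hrow']
          have hjlen : j < ((g[i]?).getD []).length := by
            rw [hrow', hrowlen]; exact hj
          rw [List.getElem?_set]
          by_cases hjeq : p.2.natAbs = j
          · have hpeq : p = ((i : Int), (j : Int)) := by
              rw [Prod.ext_iff]
              constructor <;> omega
            simp [hjlen, hpeq]
          · have hpne : p ≠ ((i : Int), (j : Int)) := by
              intro hc; apply hjeq; rw [hc]; simp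
            simp [hjeq, hpne]
        · have hpne : p ≠ ((i : Int), (j : Int)) := by
            intro hc; apply hieq; rw [hc]; simp
          simp [hieq, hpne]
      rw [hentry']
      by_cases hpe : p = ((i : Int), (j : Int))
      · simp [hpe, hr]
      · have hpe' : ((i : Int), (j : Int)) ≠ p := fun h => hpe h.symm
        simp [hpe, hpe', hr]

theorem pvBase_shape (rows cols : Int) :
    pvShape rows.toNat cols.toNat
      ((PySem.List.pyRange 0 rows 1).map (fun _ => List.replicate cols.toNat (0 : Int))) := by
  constructor
  · simp [PySem.List.length_pyRange_one]
  · intro r hr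
    obtain ⟨_, _, hx⟩ := List.mem_map.mp hr
    simp [← hx]

theorem pvBase_entry (rows cols : Int) (i j : Nat) (hi : i < rows.toNat) :
    pvEntry ((PySem.List.pyRange 0 rows 1).map (fun _ => List.replicate cols.toNat (0 : Int))) i j = 0 := by
  unfold pvEntry
  rw [pvGetD_eq]
  have hlen : i < ((PySem.List.pyRange 0 rows 1).map
      (fun _ => List.replicate cols.toNat (0 : Int))).length := by
    simp [PySem.List.length_pyRange_one]; omega
  rw [List.getElem?_eq_getElem hlen]
  simp [List.getD]

theorem pvGrid_ext (R C : Nat) (g1 g2 : List (List Int))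
    (h1 : pvShape R C g1) (h2 : pvShape R C g2)
    (he : ∀ i j, i < R → j < C → pvEntry g1 i j = pvEntry g2 i j) : g1 = g2 := by
  apply List.ext_getElem (by rw [h1.1, h2.1])
  intro i hi1 hi2
  apply List.ext_getElem
  · rw [h1.2 _ (List.getElem_mem _), h2.2 _ (List.getElem_mem _)]
  · intro j hj1 hj2
    have hiR : i < R := by rw [← h1.1]; exact hi1
    have hjC : j < C := by rw [← h1.2 _ (List.getElem_mem hi1)]; exact hj1
    have := he i j hiR hjC
    unfold pvEntry at this
    rw [pvGetD_eq, pvGetD_eq, List.getElem?_eq_getElem hi1, List.getElem?_eq_getElem hi2] at this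
    simp only [Option.getD_some] at this
    rwa [List.getD_eq_getElem _ _ hj1, List.getD_eq_getElem _ _ hj2] at this

-- ===== VERDICT (by name: the statement is the Claim_ definition above) =====
theorem make_permu_spec : Claim_equal_make_permu := by
  intro rows cols grid _ _
  unfold Spec_make_permu make_permu make_permu_alt
  rw [make_permu_scan_eq]
  simp only []
  set cells := pvCells rows cols with hcells
  set zeros := cells.filter (fun p => pvCell grid p.1 p.2 == 0) with hzeros
  set walls := cells.filter (fun p => pvCell grid p.1 p.2 == 1) with hwalls
  set viruses := cells.filter (fun p => pvCell grid p.1 p.2 != 0 && pvCell grid p.1 p.2 != 1) with hviruses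
  refine Prod.ext ?_ rfl
  simp only []
  rw [PySem.List.foldl_append_singleton_eq_map, List.nil_append]
  apply List.map_congr_left
  intro abc habc
  -- ranges of the three position lists
  have hsub : ∀ (L : List (Int × Int)), L = zeros ∨ L = walls ∨ L = viruses →
      ∀ p ∈ L, 0 ≤ p.1 ∧ p.1 < (rows.toNat : Int) ∧ 0 ≤ p.2 ∧ p.2 < (cols.toNat : Int) := by
    intro L hL p hp
    have hcell : p ∈ cells := by
      rcases hL with h | h | h <;> subst h <;> exact List.mem_of_mem_filter hp
    have := pvMem_cells.mp (hcells ▸ hcell)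
    omega
  have hzr := hsub zeros (Or.inl rfl)
  have hwr := hsub walls (Or.inr (Or.inl rfl))
  have hvr := hsub viruses (Or.inr (Or.inr rfl))
  have habc' := pvMem_combos3 habc
  have hcr : ∀ p ∈ [abc.1, abc.2.1, abc.2.2],
      0 ≤ p.1 ∧ p.1 < (rows.toNat : Int) ∧ 0 ≤ p.2 ∧ p.2 < (cols.toNat : Int) := by
    intro p hp
    simp only [List.mem_cons, List.not_mem_nil, or_false] at hp
    rcases hp with h | h | h <;> subst h
    · exact hzr _ habc'.1
    · exact hzr _ habc'.2.1
    · exact hzr _ habc'.2.2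
  set g0 := (PySem.List.pyRange 0 rows 1).map (fun _ => List.replicate cols.toNat (0 : Int)) with hg0
  have h1 := pvMakeG_shape_entry rows.toNat cols.toNat 1 walls hwr g0 (pvBase_shape rows cols)
  have h2 := pvMakeG_shape_entry rows.toNat cols.toNat 1 [abc.1, abc.2.1, abc.2.2] hcr _ h1.1
  have h3 := pvMakeG_shape_entry rows.toNat cols.toNat 2 viruses hvr _ h2.1
  -- B's grid: shape and entries
  set gB := (PySem.List.pyRange 0 rows 1).map (fun i =>
      (PySem.List.pyRange 0 cols 1).map (fun j =>
        if viruses.contains (i, j) then (2 : Int)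
        else if walls.contains (i, j) || (i, j) == abc.1 || (i, j) == abc.2.1 || (i, j) == abc.2.2 then 1
        else 0)) with hgB
  have hBshape : pvShape rows.toNat cols.toNat gB := by
    constructor
    · simp [hgB, PySem.List.length_pyRange_one]
    · intro r hr
      obtain ⟨_, _, hx⟩ := List.mem_map.mp hr
      simp [← hx, PySem.List.length_pyRange_one]
  have hBentry : ∀ i j, i < rows.toNat → j < cols.toNat →
      pvEntry gB i j =
        if viruses.contains ((i : Int), (j : Int)) then (2 : Int)
        else if walls.contains ((i : Int), (j : Int)) || ((i : Int), (j : Int)) == abc.1 ||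
            ((i : Int), (j : Int)) == abc.2.1 || ((i : Int), (j : Int)) == abc.2.2 then 1
        else 0 := by
    intro i j hi hj
    unfold pvEntry
    rw [pvGetD_eq]
    have hi' : i < ((PySem.List.pyRange 0 rows 1)).length := by
      rw [PySem.List.length_pyRange_one]; omega
    rw [hgB, List.getElem?_map, List.getElem?_eq_getElem hi']
    rw [PySem.List.getElem_pyRange_one]
    simp only [Option.map_some, Option.getD_some]
    have hj' : j < ((PySem.List.pyRange 0 cols 1)).length := by
      rw [PySem.List.length_pyRange_one]; omega
    rw [List.getD, List.getElem?_map, List.getElem?_eq_getElem hj']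
    rw [PySem.List.getElem_pyRange_one]
    simp
  apply pvGrid_ext rows.toNat cols.toNat _ _ h3.1 hBshape
  intro i j hi hj
  rw [h3.2 i j hi hj, h2.2 i j hi hj, h1.2 i j hi hj, pvBase_entry rows cols i j hi,
    hBentry i j hi hj]
  simp only [List.contains_iff_mem, Bool.or_eq_true, beq_iff_eq, List.mem_cons,
    List.not_mem_nil, or_false]
  split_ifs <;> tauto
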